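-- pv_equiv track=rewrite | github.com/96Jack/OD_interview_question | OD_interview_question/80.py | func
-- ===== SOURCE A (Python) =====
-- def func(nums):
--     left = 0
--     result_l = []
--     for i in range(len(nums)):
--         if nums[i] == 1:
--             left += 1
--         elif nums[i] == 0:
--             result_l.append(left)
--             left = 0
--         else:
--             left = 0
--             continue
--     return result_l
-- ===== SOURCE B (Python) =====
-- def func(nums):
--     # Run-based walk: scan maximal runs of equal values instead of single indices.
--     out = []
--     n = len(nums)
--     i = 0
--     prev_ones = 0
--     while i < n:
--         j = i + 1
--         while j < n and nums[j] == nums[i]: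
--             j += 1
--         if nums[i] == 1:
--             prev_ones = j - i
--         elif nums[i] == 0:
--             out.append(prev_ones)
--             out.extend([0] * (j - i - 1))
--             prev_ones = 0
--         else:
--             prev_ones = 0
--         i = j
--     return out
-- ===== Notes on version B (the rewrite author's own statement) =====
-- stated objective: alternative
-- what changed: B walks maximal runs of equal elements (two-pointer run detection), emitting the previous 1-run length for the first zero of a zero-run and 0 for the rest, instead of A's per-index counter loop.
import Mathlib
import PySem

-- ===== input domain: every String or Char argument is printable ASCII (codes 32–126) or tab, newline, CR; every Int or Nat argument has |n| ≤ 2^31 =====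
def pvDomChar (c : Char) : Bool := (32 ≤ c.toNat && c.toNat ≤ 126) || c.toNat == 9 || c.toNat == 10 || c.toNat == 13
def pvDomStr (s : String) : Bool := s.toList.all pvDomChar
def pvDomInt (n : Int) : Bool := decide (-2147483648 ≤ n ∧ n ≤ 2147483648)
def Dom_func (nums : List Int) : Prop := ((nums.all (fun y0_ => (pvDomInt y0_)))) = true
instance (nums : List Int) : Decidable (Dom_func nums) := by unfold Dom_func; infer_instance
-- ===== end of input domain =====

-- B walks maximal runs of equal elements instead of single indices; alternative decomposition, same O(n) cost.

-- ===== PORT A =====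
-- one step of A's for-loop body on the state (left, result_l)
def stepA (st : Int × List Int) (x : Int) : Int × List Int :=
  if x = 1 then (st.1 + 1, st.2)
  else if x = 0 then (0, st.2 ++ [st.1])
  else (0, st.2)

def func (nums : List Int) : List Int :=
  ((PySem.List.pyRange 0 (nums.length : Int) 1).foldl
    (fun st i => stepA st (PySem.List.pyGetD nums i 0)) ((0 : Int), ([] : List Int))).2

-- ===== PORT B =====
-- inner while: count of the leading elements of xs equal to x, and the remainder
def takeRun (x : Int) : List Int → Nat × List Int
  | [] => (0, [])
  | y :: ys => if y = x then let p := takeRun x ys; (p.1 + 1, p.2) else (0, y :: ys)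

theorem takeRun_snd_length_le (x : Int) (xs : List Int) : (takeRun x xs).2.length ≤ xs.length := by
  induction xs with
  | nil => simp [takeRun]
  | cons y ys ih =>
    simp only [takeRun]
    split
    · exact Nat.le_succ_of_le ih
    · exact Nat.le_refl _

-- outer while: process one maximal run per iteration
def goB : List Int → Int → List Int
  | [], _ => []
  | x :: xs, prev =>
    let p := takeRun x xs
    if x = 1 then goB p.2 ((p.1 : Int) + 1)
    else if x = 0 then prev :: (List.replicate p.1 0 ++ goB p.2 0)
    else goB p.2 0
termination_by l _ => l.length
decreasing_by
  · exact Nat.lt_succ_of_le (takeRun_snd_length_le _ _)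
  · exact Nat.lt_succ_of_le (takeRun_snd_length_le _ _)
  · exact Nat.lt_succ_of_le (takeRun_snd_length_le _ _)

def func_alt (nums : List Int) : List Int := goB nums 0

-- ===== PRECONDITION & SPEC =====
def Spec_func (nums : List Int) (out : List Int) : Prop := out = func_alt nums
instance (nums : List Int) (out : List Int) : Decidable (Spec_func nums out) := by unfold Spec_func; infer_instance

-- ===== CLAIM (what is proved, stated in full; the proofs are below) =====
def Claim_equal_func : Prop := ∀ (nums : List Int), Dom_func nums → Spec_func nums (func nums)

-- ===== LEMMAS AND PROOFS =====

theorem stepA_one (l : Int) (a : List Int) : stepA (l, a) 1 = (l + 1, a) := by simp [stepA]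

theorem stepA_zero (l : Int) (a : List Int) : stepA (l, a) 0 = (0, a ++ [l]) := by norm_num [stepA]

theorem stepA_other (x : Int) (hx1 : x ≠ 1) (hx0 : x ≠ 0) (l : Int) (a : List Int) :
    stepA (l, a) x = (0, a) := by simp [stepA, hx1, hx0]

theorem takeRun_spec (x : Int) (xs : List Int) :
    xs = List.replicate (takeRun x xs).1 x ++ (takeRun x xs).2 ∧
    (takeRun x xs).2.head? ≠ some x := by
  induction xs with
  | nil => simp [takeRun]
  | cons y ys ih =>
    simp only [takeRun]
    by_cases h : y = x
    · simp only [h]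
      exact ⟨by simpa [List.replicate_succ] using ih.1, ih.2⟩
    · simp [h]

theorem foldl_stepA_replicate_one (k : Nat) (left : Int) (acc : List Int) :
    (List.replicate k (1 : Int)).foldl stepA (left, acc) = (left + k, acc) := by
  induction k generalizing left with
  | zero => simp
  | succ n ih =>
    rw [List.replicate_succ, List.foldl_cons, stepA_one, ih]
    congr 1
    push_cast
    ring

theorem foldl_stepA_replicate_zero (k : Nat) (acc : List Int) :
    (List.replicate k (0 : Int)).foldl stepA ((0 : Int), acc) = (0, acc ++ List.replicate k 0) := by
  induction k generalizing acc with
  | zero => simp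
  | succ n ih =>
    rw [List.replicate_succ, List.foldl_cons, stepA_zero, ih]
    simp

theorem foldl_stepA_replicate_other (k : Nat) (x : Int) (hx1 : x ≠ 1) (hx0 : x ≠ 0)
    (acc : List Int) :
    (List.replicate k x).foldl stepA ((0 : Int), acc) = (0, acc) := by
  induction k with
  | zero => simp
  | succ n ih =>
    rw [List.replicate_succ, List.foldl_cons, stepA_other x hx1 hx0]
    exact ih

theorem foldl_stepA_eq_goB (n : Nat) (xs : List Int) (hn : xs.length ≤ n)
    (left : Int) (acc : List Int) (hl : xs.head? = some 1 → left = 0) :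
    (xs.foldl stepA (left, acc)).2 = acc ++ goB xs left := by
  induction n generalizing xs left acc with
  | zero =>
    have : xs = [] := List.eq_nil_of_length_eq_zero (Nat.le_zero.mp hn)
    subst this; simp [goB]
  | succ n ih =>
    match xs with
    | [] => simp [goB]
    | x :: ys =>
      obtain ⟨hsplit, hhead⟩ := takeRun_spec x ys
      have hlen : (takeRun x ys).2.length ≤ n := by
        have := takeRun_snd_length_le x ys
        simp at hn; omega
      by_cases h1 : x = 1
      · subst h1
        have hl0 : left = 0 := hl rfl
        subst hl0
        rw [goB]
        conv_lhs => rw [show (1 : Int) :: ys = List.replicate ((takeRun 1 ys).1 + 1) 1 ++ (takeRun 1 ys).2 by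
          rw [List.replicate_succ]; simpa using congrArg (List.cons 1) hsplit]
        rw [List.foldl_append, foldl_stepA_replicate_one]
        rw [ih _ hlen _ _ (fun hc => absurd hc hhead)]
        norm_num
      · by_cases h0 : x = 0
        · subst h0
          rw [List.foldl_cons, stepA_zero]
          conv_lhs => rw [hsplit]
          rw [List.foldl_append, foldl_stepA_replicate_zero]
          rw [ih _ hlen 0 _ (fun _ => rfl)]
          rw [goB]
          norm_num
        · rw [List.foldl_cons, stepA_other x h1 h0]
          conv_lhs => rw [hsplit]
          rw [List.foldl_append, foldl_stepA_replicate_other _ _ h1 h0]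
          rw [ih _ hlen 0 _ (fun _ => rfl)]
          rw [goB]
          simp [h1, h0]

-- ===== VERDICT (by name: the statement is the Claim_ definition above) =====
theorem func_spec : Claim_equal_func := by
  intro nums _
  unfold Spec_func func func_alt
  rw [PySem.List.foldl_pyRange_zero_pyGetD' nums 0 stepA ((0 : Int), ([] : List Int))]
  rw [foldl_stepA_eq_goB nums.length nums le_rfl 0 [] (fun _ => rfl)]
  simp
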